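-- pv_equiv track=rewrite | github.com/TheAnomalieZ/product-taz | components/org.taz.core/src/main/python/autoencoder/graph.py | labeling
-- ===== SOURCE A (Python) =====
-- def labeling(start, end, scorelist):
--     labellist = []
--     length = len(scorelist)
--     for num in range(0,length):
--         if num in range(start, end):
--             labellist.append(0)
--         else:
--             labellist.append(1)
--     return labellist
-- ===== SOURCE B (Python) =====
-- def labeling(start, end, scorelist):
--     labellist = [1] * len(scorelist)
--     for i in range(max(start, 0), min(end, len(scorelist))):
--         labellist[i] = 0
--     return labellist
-- ===== Notes on version B (the rewrite author's own statement) =====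
-- stated objective: faster
-- what changed: Replaces the per-element branch with a range-membership test (which in A builds a range object per element) by a one-shot fill of 1s followed by a clamped overwrite of the in-range indices with 0.
import Mathlib
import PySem

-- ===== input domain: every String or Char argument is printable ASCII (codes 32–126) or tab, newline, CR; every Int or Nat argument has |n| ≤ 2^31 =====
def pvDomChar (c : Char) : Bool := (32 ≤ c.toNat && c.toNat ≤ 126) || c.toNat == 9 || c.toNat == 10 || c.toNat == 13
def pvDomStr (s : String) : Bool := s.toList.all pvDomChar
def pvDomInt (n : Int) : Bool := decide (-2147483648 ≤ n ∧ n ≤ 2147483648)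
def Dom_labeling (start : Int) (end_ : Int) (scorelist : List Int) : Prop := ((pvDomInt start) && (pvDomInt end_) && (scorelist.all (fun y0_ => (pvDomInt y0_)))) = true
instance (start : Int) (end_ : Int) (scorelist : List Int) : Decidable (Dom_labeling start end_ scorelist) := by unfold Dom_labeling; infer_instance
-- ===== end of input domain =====

-- B fills a list of 1s once and then overwrites only the clamped in-range indices with 0,
-- instead of A's per-element range-membership branch.

-- ===== PORT A =====
def labeling (start : Int) (end_ : Int) (scorelist : List Int) : List Int :=
  let length : Int := scorelist.length
  (PySem.List.pyRange 0 length 1).foldl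
    (fun labellist num =>
      -- 'num in range(start, end)' is Python's O(1) range-membership test: start ≤ num < end
      if start ≤ num ∧ num < end_ then labellist ++ [(0 : Int)]
      else labellist ++ [(1 : Int)]) []

-- ===== PORT B =====
def labeling_alt (start : Int) (end_ : Int) (scorelist : List Int) : List Int :=
  let labellist := List.replicate scorelist.length (1 : Int)
  (PySem.List.pyRange (max start 0) (min end_ (scorelist.length : Int)) 1).foldl
    (fun acc i => PySem.List.pySetD acc i 0) labellist

-- ===== PRECONDITION & SPEC =====
def Spec_labeling (start : Int) (end_ : Int) (scorelist : List Int) (out : List Int) : Prop := out = labeling_alt start end_ scorelist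
instance (start : Int) (end_ : Int) (scorelist : List Int) (out : List Int) : Decidable (Spec_labeling start end_ scorelist out) := by unfold Spec_labeling; infer_instance

-- ===== CLAIM (what is proved, stated in full; the proofs are below) =====
def Claim_equal_labeling : Prop := ∀ (start : Int) (end_ : Int) (scorelist : List Int), Dom_labeling start end_ scorelist → Spec_labeling start end_ scorelist (labeling start end_ scorelist)

-- ===== LEMMAS AND PROOFS =====

theorem foldl_append_ite (start end_ : Int) :
    ∀ (xs : List Int) (init : List Int),
      xs.foldl (fun labellist num =>
        if start ≤ num ∧ num < end_ then labellist ++ [(0 : Int)]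
        else labellist ++ [(1 : Int)]) init
      = init ++ xs.map (fun num => if start ≤ num ∧ num < end_ then (0 : Int) else 1) := by
  intro xs
  induction xs with
  | nil => intro init; simp
  | cons x t ih =>
    intro init
    simp only [List.foldl_cons, List.map_cons, ih]
    by_cases h : start ≤ x ∧ x < end_
    · rw [if_pos h, if_pos h]; simp
    · rw [if_neg h, if_neg h]; simp

theorem labeling_getElem? (start end_ : Int) (scorelist : List Int) (k : Nat) :
    (labeling start end_ scorelist)[k]? =
      if k < scorelist.length then
        some (if start ≤ (k : Int) ∧ (k : Int) < end_ then (0 : Int) else 1)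
      else none := by
  unfold labeling
  simp only []
  rw [foldl_append_ite, List.nil_append, PySem.List.pyRange_one]
  simp only [List.map_map, List.getElem?_map, Int.sub_zero, Int.toNat_natCast]
  by_cases hk : k < scorelist.length
  · rw [List.getElem?_range hk, if_pos hk]
    simp
  · rw [List.getElem?_eq_none (by simpa using Nat.le_of_not_lt hk), if_neg hk]
    simp

theorem setloop_getElem? :
    ∀ (n : Nat) (L : List Int) (lo hi : Int), 0 ≤ lo → hi ≤ (L.length : Int) →
      (hi - lo).toNat = n → ∀ (k : Nat),
      ((PySem.List.pyRange lo hi 1).foldl (fun acc i => PySem.List.pySetD acc i 0) L)[k]? =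
        if lo ≤ (k : Int) ∧ (k : Int) < hi then some (0 : Int) else L[k]? := by
  intro n
  induction n with
  | zero =>
    intro L lo hi hlo hhi hn k
    rw [PySem.List.pyRange_one_eq_nil (by omega)]
    rw [if_neg (by omega)]
    rfl
  | succ m ih =>
    intro L lo hi hlo hhi hn k
    have hlt : lo < hi := by omega
    rw [PySem.List.pyRange_one_cons hlt]
    simp only [List.foldl_cons]
    rw [PySem.List.pySetD_of_nonneg L 0 hlo]
    have hlen : ((L.set lo.toNat 0).length : Int) = (L.length : Int) := by simp
    have := ih (L.set lo.toNat 0) (lo + 1) hi (by omega) (by omega) (by omega) k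
    rw [this]
    have hlo_lt : lo.toNat < L.length := by omega
    by_cases h1 : lo + 1 ≤ (k : Int) ∧ (k : Int) < hi
    · rw [if_pos h1, if_pos (by omega)]
    · rw [if_neg h1]
      by_cases h2 : lo ≤ (k : Int) ∧ (k : Int) < hi
      · have hk : k = lo.toNat := by omega
        rw [if_pos h2, hk, List.getElem?_set_self hlo_lt]
      · rw [if_neg h2, List.getElem?_set_ne (by omega)]

-- ===== VERDICT (by name: the statement is the Claim_ definition above) =====
theorem labeling_spec : Claim_equal_labeling := by
  intro start end_ scorelist _
  unfold Spec_labeling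
  apply List.ext_getElem?
  intro k
  rw [labeling_getElem?]
  unfold labeling_alt
  simp only []
  rw [setloop_getElem? ((min end_ (scorelist.length : Int)) - max start 0).toNat
        (List.replicate scorelist.length (1 : Int)) (max start 0)
        (min end_ (scorelist.length : Int)) (by omega) (by simp) rfl k]
  by_cases hk : k < scorelist.length
  · by_cases hin : start ≤ (k : Int) ∧ (k : Int) < end_
    · rw [if_pos hk, if_pos hin, if_pos (by constructor <;> omega)]
    · rw [if_pos hk, if_neg hin, if_neg (by omega), List.getElem?_replicate]
      simp [hk]
  · rw [if_neg hk, if_neg (by omega), List.getElem?_replicate, if_neg hk]
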